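-- pv_equiv track=rewrite | github.com/JackZawadzki/VoLo-Analysis-Tool | app/engine/financial_pipeline.py | _score_sheet_relevance
-- ===== SOURCE A (Python) =====
-- SHEET_PRIORITY_KEYWORDS = {
--     "high": ["summary", "p&l", "income statement", "income_statement",
--              "financial model", "financial_model", "financials",
--              "consolidated", "pro forma", "proforma",
--              "annual", "yearly"],
--     "medium": ["revenue", "operating", "balance sheet", "cash flow",
--                "cashflow", "metrics", "kpi", "dashboard", "output",
--                "forecast", "quarterly", "monthly"],
--     "low": ["notes", "assumptions", "inputs", "cover", "contents",
--             "glossary", "instructions", "readme", "changelog", "version",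
--             "production", "product table", "change log", "forecast period"],
-- }
--
-- _SEGMENT_KEYWORDS = [
--     "north america", "europe", "asia", "apac", "emea", "latam",
--     "norway", "usa", "uk", "germany", "japan", "china", "india",
--     "canada", "australia", "france", "brazil", "mexico",
--     "segment", "division", "region", "subsidiary", "entity",
--     "product a", "product b", "product c",
-- ]
--
-- def _score_sheet_relevance(sheet_name: str) -> int:
--     """Score a sheet's relevance for financial extraction (higher = more relevant).
--
--     Consolidated/summary sheets score highest (100-150).
--     Segment/geography sheets are penalised to prevent them overriding consolidated data.
--     """
--     name_lower = sheet_name.lower().strip()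
--
--     # Check for segment/entity sheets — these should NEVER override consolidated
--     is_segment = any(kw in name_lower for kw in _SEGMENT_KEYWORDS)
--
--     # Consolidated sheets get a bonus on top of other scores
--     is_consolidated = "consolidated" in name_lower or "consol" in name_lower
--
--     base_score = 25  # default
--     for kw in SHEET_PRIORITY_KEYWORDS["high"]:
--         if kw in name_lower:
--             base_score = max(base_score, 100)
--             break
--     else:
--         for kw in SHEET_PRIORITY_KEYWORDS["medium"]:
--             if kw in name_lower:
--                 base_score = max(base_score, 50)
--                 break
--         else:
--             for kw in SHEET_PRIORITY_KEYWORDS["low"]: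
--                 if kw in name_lower:
--                     base_score = 5
--                     break
--
--     # Boost consolidated sheets
--     if is_consolidated:
--         base_score = max(base_score, 120)
--
--     # Penalise segment sheets — they should only fill in gaps, not override
--     if is_segment:
--         base_score = min(base_score, 15)
--
--     return base_score
-- ===== SOURCE B (Python) =====
-- # One keyword->rank index scanned once, base score looked up from the best rank.
-- SHEET_PRIORITY_KEYWORDS = {
--     "high": ["summary", "p&l", "income statement", "income_statement",
--              "financial model", "financial_model", "financials",
--              "consolidated", "pro forma", "proforma",
--              "annual", "yearly"],
--     "medium": ["revenue", "operating", "balance sheet", "cash flow",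
--                "cashflow", "metrics", "kpi", "dashboard", "output",
--                "forecast", "quarterly", "monthly"],
--     "low": ["notes", "assumptions", "inputs", "cover", "contents",
--             "glossary", "instructions", "readme", "changelog", "version",
--             "production", "product table", "change log", "forecast period"],
-- }
--
-- _SEGMENT_KEYWORDS = [
--     "north america", "europe", "asia", "apac", "emea", "latam",
--     "norway", "usa", "uk", "germany", "japan", "china", "india",
--     "canada", "australia", "france", "brazil", "mexico",
--     "segment", "division", "region", "subsidiary", "entity",
--     "product a", "product b", "product c",
-- ]
--
-- _RANK_BY_KEYWORD = {kw: rank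
--                     for tier, rank in (("high", 3), ("medium", 2), ("low", 1))
--                     for kw in SHEET_PRIORITY_KEYWORDS[tier]}
--
-- _BASE_BY_RANK = {0: 25, 1: 5, 2: 50, 3: 100}
--
--
-- def _score_sheet_relevance(sheet_name: str) -> int:
--     name_lower = sheet_name.lower().strip()
--     best = max((rank for kw, rank in _RANK_BY_KEYWORD.items()
--                 if kw in name_lower), default=0)
--     score = _BASE_BY_RANK[best]
--     if "consol" in name_lower:          # "consolidated" contains "consol"
--         score = max(score, 120)
--     if any(kw in name_lower for kw in _SEGMENT_KEYWORDS):
--         score = min(score, 15)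
--     return score
-- ===== Notes on version B (the rewrite author's own statement) =====
-- stated objective: alternative
-- what changed: Replaces A's three cascading per-tier scans with for/break/else by a single pass over a precomputed keyword-to-rank index taking the maximum matched rank, then a rank-to-base-score dict lookup; the consolidated boost and segment penalty are applied as before.
import Mathlib
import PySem

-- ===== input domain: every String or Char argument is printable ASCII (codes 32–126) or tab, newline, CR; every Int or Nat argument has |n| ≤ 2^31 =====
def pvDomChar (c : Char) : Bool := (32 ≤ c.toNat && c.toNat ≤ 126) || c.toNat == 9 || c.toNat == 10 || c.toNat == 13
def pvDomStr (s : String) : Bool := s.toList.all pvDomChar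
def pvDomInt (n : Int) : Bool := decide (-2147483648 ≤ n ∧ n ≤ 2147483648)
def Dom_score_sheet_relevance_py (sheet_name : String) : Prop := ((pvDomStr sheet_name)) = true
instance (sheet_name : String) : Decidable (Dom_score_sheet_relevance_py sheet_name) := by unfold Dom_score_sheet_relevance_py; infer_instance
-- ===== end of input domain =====

-- B replaces A's three cascading per-tier scans by one scan over a keyword→rank index plus a rank→score lookup (alternative decomposition, same cost).

-- ===== PORT A =====
-- shared module constants (the keyword lists of financial_pipeline.py)
def pvHigh : List String := ["summary", "p&l", "income statement", "income_statement",
  "financial model", "financial_model", "financials", "consolidated", "pro forma",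
  "proforma", "annual", "yearly"]
def pvMedium : List String := ["revenue", "operating", "balance sheet", "cash flow",
  "cashflow", "metrics", "kpi", "dashboard", "output", "forecast", "quarterly", "monthly"]
def pvLow : List String := ["notes", "assumptions", "inputs", "cover", "contents",
  "glossary", "instructions", "readme", "changelog", "version", "production",
  "product table", "change log", "forecast period"]
def pvSegment : List String := ["north america", "europe", "asia", "apac", "emea",
  "latam", "norway", "usa", "uk", "germany", "japan", "china", "india", "canada",
  "australia", "france", "brazil", "mexico", "segment", "division", "region",
  "subsidiary", "entity", "product a", "product b", "product c"]

-- A's low-tier for/break loop (sets base_score = 5 on the first hit)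
def pvTierLow (base : Int) (kws : List String) (nl : String) : Int :=
  match kws with
  | [] => base
  | k :: ks => if PySem.Str.isIn k nl then 5 else pvTierLow base ks nl

-- A's medium-tier for/break loop; its for-else falls through to the low loop
def pvTierMedium (base : Int) (kws : List String) (nl : String) : Int :=
  match kws with
  | [] => pvTierLow base pvLow nl
  | k :: ks => if PySem.Str.isIn k nl then max base 50 else pvTierMedium base ks nl

-- A's high-tier for/break loop; its for-else falls through to the medium loop
def pvTierHigh (base : Int) (kws : List String) (nl : String) : Int :=
  match kws with
  | [] => pvTierMedium base pvMedium nl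
  | k :: ks => if PySem.Str.isIn k nl then max base 100 else pvTierHigh base ks nl

def score_sheet_relevance_py (sheet_name : String) : Int :=
  let nl := PySem.Str.strip (PySem.Str.lower sheet_name)
  let isSeg := pvSegment.any (fun kw => PySem.Str.isIn kw nl)
  let isCons := PySem.Str.isIn "consolidated" nl || PySem.Str.isIn "consol" nl
  let base := pvTierHigh 25 pvHigh nl
  let base := if isCons then max base 120 else base
  if isSeg then min base 15 else base

-- ===== PORT B =====
-- the keyword→rank dict of Source B, in insertion order
def pvRankList : List (String × Int) :=
  pvHigh.map (fun k => (k, 3)) ++ pvMedium.map (fun k => (k, 2)) ++ pvLow.map (fun k => (k, 1))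

def pvBaseByRank : PySem.Dict Int Int := PySem.Dict.ofList [(0, 25), (1, 5), (2, 50), (3, 100)]

def score_sheet_relevance_py_alt (sheet_name : String) : Int :=
  let nl := PySem.Str.strip (PySem.Str.lower sheet_name)
  let best := pvRankList.foldl (fun acc p => if PySem.Str.isIn p.1 nl then max acc p.2 else acc) 0
  let score := PySem.Dict.getD pvBaseByRank best 0   -- key is always present (best ∈ {0,1,2,3})
  let score := if PySem.Str.isIn "consol" nl then max score 120 else score
  if pvSegment.any (fun kw => PySem.Str.isIn kw nl) then min score 15 else score

-- ===== PRECONDITION & SPEC =====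
def Spec_score_sheet_relevance_py (sheet_name : String) (out : Int) : Prop := out = score_sheet_relevance_py_alt sheet_name
instance (sheet_name : String) (out : Int) : Decidable (Spec_score_sheet_relevance_py sheet_name out) := by unfold Spec_score_sheet_relevance_py; infer_instance

-- ===== CLAIM (what is proved, stated in full; the proofs are below) =====
def Claim_equal_score_sheet_relevance_py : Prop := ∀ (sheet_name : String), Dom_score_sheet_relevance_py sheet_name → Spec_score_sheet_relevance_py sheet_name (score_sheet_relevance_py sheet_name)

-- ===== LEMMAS AND PROOFS =====

lemma tierLow_eq (base : Int) (kws : List String) (nl : String) :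
    pvTierLow base kws nl = if kws.any (fun k => PySem.Str.isIn k nl) then 5 else base := by
  induction kws with
  | nil => simp [pvTierLow]
  | cons k ks ih =>
    by_cases h : PySem.Chars.isIn k.toList nl.toList = true
    · simp [pvTierLow, h]
    · simp only [Bool.not_eq_true] at h
      simp [pvTierLow, h, ih]

lemma tierMedium_eq (base : Int) (kws : List String) (nl : String) :
    pvTierMedium base kws nl = if kws.any (fun k => PySem.Str.isIn k nl) then max base 50
      else pvTierLow base pvLow nl := by
  induction kws with
  | nil => simp [pvTierMedium]
  | cons k ks ih =>
    by_cases h : PySem.Chars.isIn k.toList nl.toList = true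
    · simp [pvTierMedium, h]
    · simp only [Bool.not_eq_true] at h
      simp [pvTierMedium, h, ih]

lemma tierHigh_eq (base : Int) (kws : List String) (nl : String) :
    pvTierHigh base kws nl = if kws.any (fun k => PySem.Str.isIn k nl) then max base 100
      else pvTierMedium base pvMedium nl := by
  induction kws with
  | nil => simp [pvTierHigh]
  | cons k ks ih =>
    by_cases h : PySem.Chars.isIn k.toList nl.toList = true
    · simp [pvTierHigh, h]
    · simp only [Bool.not_eq_true] at h
      simp [pvTierHigh, h, ih]

lemma foldl_rank_map (r acc : Int) (ks : List String) (nl : String) :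
    (ks.map (fun k => (k, r))).foldl
      (fun acc p => if PySem.Str.isIn p.1 nl then max acc p.2 else acc) acc
    = if ks.any (fun k => PySem.Str.isIn k nl) then max acc r else acc := by
  induction ks generalizing acc with
  | nil => simp
  | cons k ks ih =>
    simp only [List.map_cons, List.foldl_cons, List.any_cons, Bool.or_eq_true]
    split_ifs with h <;> simp_all

lemma consol_of_consolidated (nl : String) (h : PySem.Str.isIn "consolidated" nl = true) :
    PySem.Str.isIn "consol" nl = true := by
  rw [PySem.Str.isIn_eq] at h ⊢
  rw [PySem.Chars.isIn_iff_infix] at h ⊢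
  exact List.IsInfix.trans (by decide) h

-- ===== VERDICT (by name: the statement is the Claim_ definition above) =====
theorem score_sheet_relevance_py_spec : Claim_equal_score_sheet_relevance_py := by
  intro s _
  unfold Spec_score_sheet_relevance_py score_sheet_relevance_py score_sheet_relevance_py_alt
  simp only [pvRankList, List.foldl_append, foldl_rank_map, tierHigh_eq, tierMedium_eq, tierLow_eq]
  set nl := PySem.Str.strip (PySem.Str.lower s) with hnl
  have hc : (PySem.Str.isIn "consolidated" nl || PySem.Str.isIn "consol" nl)
      = PySem.Str.isIn "consol" nl := by
    cases h : PySem.Str.isIn "consolidated" nl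
    · simp
    · rw [consol_of_consolidated nl h]; rfl
  rw [hc]
  cases hh : pvHigh.any (fun k => PySem.Str.isIn k nl) <;>
  cases hm : pvMedium.any (fun k => PySem.Str.isIn k nl) <;>
  cases hl : pvLow.any (fun k => PySem.Str.isIn k nl) <;>
    simp [PySem.Dict.getD] <;> split_ifs <;> rfl
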